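-- pv_equiv track=rewrite | github.com/prachijain07/Prachi-programs | src/Problem_7.py | seed_no
-- ===== SOURCE A (Python) =====
-- def seed_no(number,ref_no):
--     temp=number
--     f=1
--     while(number>0):
--         i=number%10
--         f=f*i
--         number=number//10
--     if(ref_no==temp*f):
--         return True
--     else:
--         return False
-- ===== SOURCE B (Python) =====
-- def seed_no(number, ref_no):
--     # Trial-division check: instead of multiplying the digits and comparing,
--     # divide ref_no by number and by each digit exactly; it is the seed iff we end at 1
--     # (equivalently: peel digits off number dividing ref_no down to number).
--     if number <= 0:
--         return ref_no == number
--     n, t = number, ref_no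
--     while n > 0:
--         d = n % 10
--         n //= 10
--         if d == 0:
--             return ref_no == 0
--         if t % d != 0:
--             return False
--         t //= d
--     return t == number
-- ===== Notes on version B (the rewrite author's own statement) =====
-- stated objective: alternative
-- what changed: B verifies the seed equation by exact trial division: it divides ref_no down by each digit of number (early-exiting on a zero digit or an inexact division) and checks the quotient lands on number, instead of A's loop that multiplies the digits into a product and compares ref_no to number*product.
import Mathlib
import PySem

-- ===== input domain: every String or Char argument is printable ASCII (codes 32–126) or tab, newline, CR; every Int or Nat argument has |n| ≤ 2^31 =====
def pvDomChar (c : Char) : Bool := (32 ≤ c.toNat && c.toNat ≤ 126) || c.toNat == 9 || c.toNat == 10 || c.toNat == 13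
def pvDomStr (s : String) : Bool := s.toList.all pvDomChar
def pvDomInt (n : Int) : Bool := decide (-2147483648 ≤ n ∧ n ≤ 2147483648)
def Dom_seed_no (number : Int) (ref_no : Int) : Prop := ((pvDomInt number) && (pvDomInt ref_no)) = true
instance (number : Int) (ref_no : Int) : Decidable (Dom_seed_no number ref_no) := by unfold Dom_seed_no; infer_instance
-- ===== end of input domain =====

-- B checks the seed equation by exact trial division (dividing ref_no down by the digits
-- of number, with early exits) instead of A's multiply-the-digits-then-compare loop;
-- same cost, a different verification strategy. Proven equal on all inputs.

-- ===== PORT A =====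
-- the while(number>0) loop, carrying (number, f)
def seedLoop (number f : Int) : Int :=
  if _h : 0 < number then
    seedLoop (PySem.Int.floordiv number 10) (f * PySem.Int.mod number 10)
  else f
termination_by number.toNat
decreasing_by
  rw [PySem.Int.floordiv_eq_ediv_of_pos (by norm_num)]
  omega

def seed_no (number : Int) (ref_no : Int) : Bool :=
  let temp := number
  let f := seedLoop number 1
  decide (ref_no = temp * f)

-- ===== PORT B =====
-- the while(n>0) loop of Source B, carrying (n, t); three exits, in Source B's order
-- (d and n' from Source B are written inline: d = n % 10, n' = n // 10)
def altLoop (number ref_no n t : Int) : Bool :=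
  if _h : 0 < n then
    if PySem.Int.mod n 10 = 0 then decide (ref_no = 0)
    else if PySem.Int.mod t (PySem.Int.mod n 10) ≠ 0 then false
    else altLoop number ref_no (PySem.Int.floordiv n 10)
           (PySem.Int.floordiv t (PySem.Int.mod n 10))
  else decide (t = number)
termination_by n.toNat
decreasing_by
  rw [PySem.Int.floordiv_eq_ediv_of_pos (by norm_num)]
  omega

def seed_no_alt (number : Int) (ref_no : Int) : Bool :=
  if number ≤ 0 then decide (ref_no = number)
  else altLoop number ref_no number ref_no

-- ===== PRECONDITION & SPEC =====
def Spec_seed_no (number : Int) (ref_no : Int) (out : Bool) : Prop := out = seed_no_alt number ref_no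
instance (number : Int) (ref_no : Int) (out : Bool) : Decidable (Spec_seed_no number ref_no out) := by unfold Spec_seed_no; infer_instance

-- ===== CLAIM (what is proved, stated in full; the proofs are below) =====
def Claim_equal_seed_no : Prop := ∀ (number : Int) (ref_no : Int), Dom_seed_no number ref_no → Spec_seed_no number ref_no (seed_no number ref_no)

-- ===== LEMMAS AND PROOFS =====

-- the digit product of n peeled from the low end, as A's loop computes it
def Pnat : Nat → Int
  | 0 => 1
  | (n+1) => Pnat ((n+1)/10) * (((n+1) % 10 : Nat) : Int)
decreasing_by omega

theorem Pnat_pos_eq (n : Nat) (hn : 0 < n) :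
    Pnat n = Pnat (n/10) * ((n % 10 : Nat) : Int) := by
  cases n with
  | zero => omega
  | succ m => rw [Pnat]

theorem seedLoop_eq (n : Nat) : ∀ (f : Int), seedLoop (n : Int) f = f * Pnat n := by
  induction n using Nat.strong_induction_on with
  | _ n ih =>
    intro f
    rw [seedLoop]
    by_cases hn : 0 < n
    · rw [dif_pos (by exact_mod_cast hn)]
      have h1 : PySem.Int.floordiv (n:Int) 10 = ((n/10 : Nat) : Int) := by
        exact_mod_cast PySem.Int.floordiv_natCast n 10
      have h2 : PySem.Int.mod (n:Int) 10 = ((n % 10 : Nat) : Int) := by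
        exact_mod_cast PySem.Int.mod_natCast n 10
      rw [h1, h2]
      rw [ih (n/10) (by omega)]
      rw [Pnat_pos_eq n hn]
      ring
    · have hn0 : n = 0 := by omega
      subst hn0
      simp [Pnat]

-- invariant: ref_no = t * c with c a nonzero product of the digits already divided out
theorem altLoop_eq (number ref_no : Int) (n : Nat) :
    ∀ (t c : Int), c ≠ 0 → ref_no = t * c →
      altLoop number ref_no (n : Int) t = decide (t = number * Pnat n) := by
  induction n using Nat.strong_induction_on with
  | _ n ih =>
    intro t c hc hinv
    rw [altLoop]
    by_cases hn : 0 < n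
    · rw [dif_pos (by exact_mod_cast hn)]
      have h1 : PySem.Int.floordiv (n:Int) 10 = ((n/10 : Nat) : Int) := by
        exact_mod_cast PySem.Int.floordiv_natCast n 10
      have h2 : PySem.Int.mod (n:Int) 10 = ((n % 10 : Nat) : Int) := by
        exact_mod_cast PySem.Int.mod_natCast n 10
      rw [h1, h2]
      have hP : Pnat n = Pnat (n/10) * ((n % 10 : Nat) : Int) := Pnat_pos_eq n hn
      by_cases hd0 : ((n % 10 : Nat) : Int) = 0
      · rw [if_pos hd0]
        rw [hP, hd0, mul_zero, mul_zero]
        have hz : (ref_no = 0) ↔ (t = 0) := by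
          constructor
          · intro h; rcases mul_eq_zero.mp (hinv ▸ h) with h' | h'
            · exact h'
            · exact absurd h' hc
          · intro h; rw [hinv, h, zero_mul]
        simp [hz]
      · rw [if_neg hd0]
        have hdpos : (0:Int) < ((n % 10 : Nat) : Int) := by
          have : 0 ≤ ((n % 10 : Nat) : Int) := Int.natCast_nonneg _
          omega
        by_cases hdvd : ((n % 10 : Nat) : Int) ∣ t
        · have hmod0 : PySem.Int.mod t ((n % 10 : Nat) : Int) = 0 :=
            (PySem.Int.mod_eq_zero_iff_dvd _ _).mpr hdvd
          rw [if_neg (by simp only [ne_eq, not_not]; exact hmod0)]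
          have hfd : PySem.Int.floordiv t ((n % 10 : Nat) : Int) = t / ((n % 10 : Nat) : Int) :=
            PySem.Int.floordiv_eq_ediv_of_pos hdpos
          rw [hfd]
          have ht : t / ((n % 10 : Nat) : Int) * ((n % 10 : Nat) : Int) = t :=
            Int.ediv_mul_cancel hdvd
          have hinv' : ref_no = (t / ((n % 10 : Nat) : Int)) * (c * ((n % 10 : Nat) : Int)) := by
            rw [hinv]; nth_rewrite 1 [← ht]; ring
          rw [ih (n/10) (by omega) (t / ((n % 10 : Nat) : Int)) (c * ((n % 10 : Nat) : Int))
                (mul_ne_zero hc hd0) hinv']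
          have hiff : (t / ((n % 10 : Nat) : Int) = number * Pnat (n/10)) ↔ (t = number * Pnat n) := by
            constructor
            · intro h
              calc t = t / ((n % 10 : Nat) : Int) * ((n % 10 : Nat) : Int) := ht.symm
                _ = number * Pnat (n/10) * ((n % 10 : Nat) : Int) := by rw [h]
                _ = number * Pnat n := by rw [hP]; ring
            · intro h
              rw [h, hP, ← mul_assoc]
              exact Int.mul_ediv_cancel _ hd0
          exact decide_eq_decide.mpr hiff
        · have hmodne : PySem.Int.mod t ((n % 10 : Nat) : Int) ≠ 0 := by
            intro h; exact hdvd ((PySem.Int.mod_eq_zero_iff_dvd _ _).mp h)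
          rw [if_pos (by simpa using hmodne)]
          have hne : t ≠ number * Pnat n := by
            intro h
            apply hdvd
            rw [h, hP]
            exact ((dvd_mul_left _ (Pnat (n/10))).mul_left number)
          simp [hne]
    · have hn0 : n = 0 := by omega
      subst hn0
      simp [Pnat]

-- ===== VERDICT (by name: the statement is the Claim_ definition above) =====
theorem seed_no_spec : Claim_equal_seed_no := by
  intro number ref_no _hdom
  unfold Spec_seed_no seed_no seed_no_alt
  by_cases h : number ≤ 0
  · rw [if_pos h]
    rw [seedLoop, dif_neg (by omega)]
    simp
  · rw [if_neg h]
    have hcast : ((number.toNat : Nat) : Int) = number := Int.toNat_of_nonneg (by omega)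
    have hloop : seedLoop number 1 = Pnat number.toNat := by
      have h0 := seedLoop_eq number.toNat 1
      rw [hcast, one_mul] at h0
      exact h0
    have halt : altLoop number ref_no number ref_no = decide (ref_no = number * Pnat number.toNat) := by
      have h0 := altLoop_eq number ref_no number.toNat ref_no 1 one_ne_zero (by ring)
      rw [hcast] at h0
      exact h0
    rw [hloop, halt]
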